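-- pv_equiv track=rewrite | github.com/Py-CI-Park/STOM | backtester/segment_analysis/code_generator.py | _format_var_comment
-- ===== SOURCE A (Python) =====
-- from typing import Dict, List, Optional, Tuple
--
-- def _format_var_comment(label: str, values: List[str], chunk_size: int = 6) -> List[str]:
--     if not values:
--         return [f"# {label}: (none)"]
--     lines = []
--     chunk: List[str] = []
--     for val in values:
--         chunk.append(val)
--         if len(chunk) >= chunk_size:
--             prefix = f"# {label}: " if not lines else "# "
--             lines.append(prefix + ", ".join(chunk))
--             chunk = []
--     if chunk:
--         prefix = f"# {label}: " if not lines else "# "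
--         lines.append(prefix + ", ".join(chunk))
--     return lines
-- ===== SOURCE B (Python) =====
-- def _format_var_comment(label, values, chunk_size=6):
--     if not values:
--         return [f"# {label}: (none)"]
--     step = chunk_size if chunk_size > 0 else 1
--     chunks = []
--     rest = values
--     while rest:
--         chunks.append(rest[:step])
--         rest = rest[step:]
--     return [("# %s: " % label if i == 0 else "# ") + ", ".join(c)
--             for i, c in enumerate(chunks)]
-- ===== Notes on version B (the rewrite author's own statement) =====
-- stated objective: simpler
-- what changed: B replaces A's accumulate-and-flush loop (mutable chunk buffer with in-loop and trailing flushes and duplicated prefix logic) by slicing the list into chunks up front (rest[:step]/rest[step:], with step clamped to 1 when chunk_size <= 0) and formatting them in one enumerate-driven comprehension.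
import Mathlib
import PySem

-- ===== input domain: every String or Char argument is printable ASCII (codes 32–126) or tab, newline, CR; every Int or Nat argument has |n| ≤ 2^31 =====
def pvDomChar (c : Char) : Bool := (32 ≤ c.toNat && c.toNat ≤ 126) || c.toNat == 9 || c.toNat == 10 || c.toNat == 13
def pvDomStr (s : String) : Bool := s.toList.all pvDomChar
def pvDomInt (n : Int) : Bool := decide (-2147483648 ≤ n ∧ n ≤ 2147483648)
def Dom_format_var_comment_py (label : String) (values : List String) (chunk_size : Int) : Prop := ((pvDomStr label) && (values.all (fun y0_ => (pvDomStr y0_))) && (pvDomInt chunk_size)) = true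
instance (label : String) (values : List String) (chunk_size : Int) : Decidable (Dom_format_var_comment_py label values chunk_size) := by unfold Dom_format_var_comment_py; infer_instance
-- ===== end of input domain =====

-- B chunks the list up front by slicing (rest[:step] / rest[step:]) and formats each chunk
-- with an enumerate-driven comprehension, instead of A's accumulate-and-flush loop; objective: simpler.


-- ===== PORT A =====
-- A's for-loop: state (lines, chunk); append val, flush when len(chunk) >= chunk_size; final flush.
def fvcGo (label : String) (chunk_size : Int) (lines chunk : List String) : List String → List String
  | [] =>
      if chunk.isEmpty then lines
      else lines ++ [(if lines.isEmpty then "# " ++ label ++ ": " else "# ") ++ PySem.Str.join ", " chunk]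
  | v :: rest =>
      let c := chunk ++ [v]
      if (c.length : Int) ≥ chunk_size then
        fvcGo label chunk_size
          (lines ++ [(if lines.isEmpty then "# " ++ label ++ ": " else "# ") ++ PySem.Str.join ", " c])
          [] rest
      else
        fvcGo label chunk_size lines c rest

def format_var_comment_py (label : String) (values : List String) (chunk_size : Int) : List String :=
  if values.isEmpty then ["# " ++ label ++ ": (none)"]
  else fvcGo label chunk_size [] [] values

-- ===== PORT B =====
-- Source B's while loop: chunks.append(rest[:step]); rest = rest[step:].  The Nat parameter is
-- step - 1 (so the slice width is s+1), which makes termination structural; step ≥ 1 in Source B.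
def fvcChunks (s : Nat) : List String → List (List String)
  | [] => []
  | v :: rest => ((v :: rest).take (s + 1)) :: fvcChunks s ((v :: rest).drop (s + 1))
termination_by rest => rest.length
decreasing_by simp

def format_var_comment_py_alt (label : String) (values : List String) (chunk_size : Int) : List String :=
  if values.isEmpty then ["# " ++ label ++ ": (none)"]
  else
    let step : Nat := if chunk_size > 0 then chunk_size.toNat else 1
    (PySem.List.enumerate (fvcChunks (step - 1) values)).map
      (fun ic => (if ic.1 == 0 then "# " ++ label ++ ": " else "# ") ++ PySem.Str.join ", " ic.2)

-- ===== PRECONDITION & SPEC =====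
def Spec_format_var_comment_py (label : String) (values : List String) (chunk_size : Int) (out : List String) : Prop := out = format_var_comment_py_alt label values chunk_size
instance (label : String) (values : List String) (chunk_size : Int) (out : List String) : Decidable (Spec_format_var_comment_py label values chunk_size out) := by unfold Spec_format_var_comment_py; infer_instance

-- ===== CLAIM (what is proved, stated in full; the proofs are below) =====
def Claim_equal_format_var_comment_py : Prop := ∀ (label : String) (values : List String) (chunk_size : Int), Dom_format_var_comment_py label values chunk_size → Spec_format_var_comment_py label values chunk_size (format_var_comment_py label values chunk_size)

-- ===== LEMMAS AND PROOFS =====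

-- A's grouping, abstracted: groups of size `step` (Nat), mirroring fvcGo's flush pattern.
def fvcChunkedA (step : Nat) (chunk : List String) : List String → List (List String)
  | [] => if chunk.isEmpty then [] else [chunk]
  | v :: rest =>
      if step ≤ (chunk ++ [v]).length then (chunk ++ [v]) :: fvcChunkedA step [] rest
      else fvcChunkedA step (chunk ++ [v]) rest

-- formatting of a group list: label prefix on the first line only
def fvcRender (label : String) (first : Bool) : List (List String) → List String
  | [] => []
  | g :: gs =>
      ((if first then "# " ++ label ++ ": " else "# ") ++ PySem.Str.join ", " g) :: fvcRender label false gs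

theorem fvc_cond_iff (cs : Int) (n : Nat) (hn : 1 ≤ n) :
    ((n : Int) ≥ cs) ↔ ((if cs > 0 then cs.toNat else 1) ≤ n) := by
  split_ifs with h <;> omega

theorem fvcGo_eq_render (label : String) (cs : Int) :
    ∀ (vs lines chunk : List String),
      chunk.length < (if cs > 0 then cs.toNat else 1) →
      fvcGo label cs lines chunk vs
        = lines ++ fvcRender label lines.isEmpty (fvcChunkedA (if cs > 0 then cs.toNat else 1) chunk vs) := by
  intro vs
  induction vs with
  | nil =>
      intro lines chunk _
      by_cases hc : chunk.isEmpty
      · simp [fvcGo, fvcChunkedA, hc, fvcRender]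
      · cases lines with
        | nil => simp [fvcGo, fvcChunkedA, hc, fvcRender]
        | cons l ls => simp [fvcGo, fvcChunkedA, hc, fvcRender]
  | cons v rest ih =>
      intro lines chunk hlt
      set step := (if cs > 0 then cs.toNat else 1) with hstep
      have hone : 1 ≤ (chunk ++ [v]).length := by simp
      have hgo : fvcGo label cs lines chunk (v :: rest)
          = if ((chunk ++ [v]).length : Int) ≥ cs then
              fvcGo label cs
                (lines ++ [(if lines.isEmpty then "# " ++ label ++ ": " else "# ") ++ PySem.Str.join ", " (chunk ++ [v])])
                [] rest
            else fvcGo label cs lines (chunk ++ [v]) rest := rfl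
      have hch : fvcChunkedA step chunk (v :: rest)
          = if step ≤ (chunk ++ [v]).length then (chunk ++ [v]) :: fvcChunkedA step [] rest
            else fvcChunkedA step (chunk ++ [v]) rest := rfl
      by_cases hcond : ((chunk ++ [v]).length : Int) ≥ cs
      · have hstepc : step ≤ (chunk ++ [v]).length := (fvc_cond_iff cs _ hone).mp hcond
        have hstep1 : 0 < step := by simp only [hstep]; split_ifs <;> omega
        rw [hgo, if_pos hcond, ih _ [] (by simpa using hstep1), hch, if_pos hstepc]
        cases lines <;> simp [fvcRender]
      · have hstepc : ¬ step ≤ (chunk ++ [v]).length := fun h => hcond ((fvc_cond_iff cs _ hone).mpr h)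
        rw [hgo, if_neg hcond, ih lines (chunk ++ [v]) (by simp at hstepc ⊢; omega), hch, if_neg hstepc]

-- one unfolding of fvcChunkedA on a partial chunk: the next group is chunk filled up to step
theorem fvcChunkedA_unfold (step : Nat) :
    ∀ (vs chunk : List String), chunk.length < step →
      fvcChunkedA step chunk vs
        = if chunk.isEmpty ∧ vs.isEmpty then []
          else (chunk ++ vs.take (step - chunk.length))
                 :: fvcChunkedA step [] (vs.drop (step - chunk.length)) := by
  intro vs
  induction vs with
  | nil =>
      intro chunk hlt
      by_cases hc : chunk.isEmpty
      · simp [fvcChunkedA, hc]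
      · simp [fvcChunkedA, hc]
  | cons v rest ih =>
      intro chunk hlt
      have hch : fvcChunkedA step chunk (v :: rest)
          = if step ≤ (chunk ++ [v]).length then (chunk ++ [v]) :: fvcChunkedA step [] rest
            else fvcChunkedA step (chunk ++ [v]) rest := rfl
      by_cases hfull : step ≤ (chunk ++ [v]).length
      · have h1 : step - chunk.length = 1 := by simp at hfull; omega
        rw [hch, if_pos hfull]
        simp [h1, List.take, List.drop]
      · have hlen : (chunk ++ [v]).length = chunk.length + 1 := by simp
        have h2 : 2 ≤ step - chunk.length := by simp at hfull; omega
        rw [hch, if_neg hfull, ih (chunk ++ [v]) (by simp at hfull ⊢; omega)]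
        have hm : step - chunk.length = (step - (chunk ++ [v]).length) + 1 := by
          rw [hlen]; omega
        have htk : (v :: rest).take (step - chunk.length)
            = v :: rest.take (step - (chunk ++ [v]).length) := by
          rw [hm, List.take_succ_cons]
        have hdr : (v :: rest).drop (step - chunk.length)
            = rest.drop (step - (chunk ++ [v]).length) := by
          rw [hm, List.drop_succ_cons]
        rw [htk, hdr]
        simp

theorem fvcChunkedA_eq_fvcChunks (step : Nat) (hs : 1 ≤ step) :
    ∀ (vs : List String), fvcChunkedA step [] vs = fvcChunks (step - 1) vs := by
  intro vs
  induction hn : vs.length using Nat.strong_induction_on generalizing vs with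
  | _ n ih =>
    cases vs with
    | nil => simp [fvcChunkedA, fvcChunks]
    | cons v rest =>
      rw [fvcChunkedA_unfold step (v :: rest) [] (by simp; omega)]
      have hss : step - 1 + 1 = step := by omega
      have hcs : fvcChunks (step - 1) (v :: rest)
          = ((v :: rest).take (step - 1 + 1)) :: fvcChunks (step - 1) ((v :: rest).drop (step - 1 + 1)) := by
        simp only [fvcChunks]
      rw [hcs, hss]
      simp only [List.isEmpty_cons, List.length_nil, Nat.sub_zero, List.nil_append,
        List.isEmpty_nil, Bool.false_eq_true, and_false, if_false]
      rw [ih ((v :: rest).drop step).length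
            (by subst hn; simp only [List.length_drop, List.length_cons]; omega) _ rfl]

theorem fvcRender_false_eq_enumerate (label : String) :
    ∀ (gs : List (List String)) (k : Int), 1 ≤ k →
      (PySem.List.enumerate gs k).map
          (fun ic => (if ic.1 == 0 then "# " ++ label ++ ": " else "# ") ++ PySem.Str.join ", " ic.2)
        = fvcRender label false gs := by
  intro gs
  induction gs with
  | nil => intro k _; simp [PySem.List.enumerate_nil, fvcRender]
  | cons g gs ih =>
      intro k hk
      rw [PySem.List.enumerate_cons]
      have hk0 : (k == 0) = false := by simp; omega
      simp only [List.map_cons, hk0, fvcRender]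
      rw [ih (k + 1) (by omega)]

theorem fvcRender_true_eq_enumerate (label : String) (gs : List (List String)) :
    (PySem.List.enumerate gs 0).map
        (fun ic => (if ic.1 == 0 then "# " ++ label ++ ": " else "# ") ++ PySem.Str.join ", " ic.2)
      = fvcRender label true gs := by
  cases gs with
  | nil => simp [PySem.List.enumerate_nil, fvcRender]
  | cons g gs =>
      rw [PySem.List.enumerate_cons, List.map_cons,
        show (0 : Int) + 1 = 1 from rfl,
        fvcRender_false_eq_enumerate label gs 1 (by omega)]
      simp [fvcRender]

-- ===== VERDICT (by name: the statement is the Claim_ definition above) =====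
theorem format_var_comment_py_spec : Claim_equal_format_var_comment_py := by
  intro label values chunk_size _
  unfold Spec_format_var_comment_py
  unfold format_var_comment_py format_var_comment_py_alt
  by_cases hv : values.isEmpty
  · simp [hv]
  · simp only [hv]
    set step := (if chunk_size > 0 then chunk_size.toNat else 1) with hstep
    have hs : 1 ≤ step := by simp [hstep]; split_ifs <;> omega
    rw [fvcGo_eq_render label chunk_size values [] [] (by simpa using hs)]
    rw [← hstep, fvcChunkedA_eq_fvcChunks step hs values]
    rw [fvcRender_true_eq_enumerate label]
    simp
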